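-- pv_equiv track=rewrite | github.com/iLab-USC/USC-DCT | 0_DCT_support/dataset_utils.py | is_list_in_alphabetical_order
-- ===== SOURCE A (Python) =====
-- def is_list_in_alphabetical_order(class_list: list[str]) -> bool:
--     """tests if list is in alphabetical order"""
--
--     # must specify key=str.casefold in order to ignore case
--     sorted_class_names = sorted(class_list, key=str.casefold)
--
--     class_names_in_alphabetical_order = True
--     for i in range(len(class_list)):
--         if sorted_class_names[i] != class_list[i]:
--             class_names_in_alphabetical_order = False
--             break
--
--     return class_names_in_alphabetical_order
-- ===== SOURCE B (Python) =====
-- def is_list_in_alphabetical_order(class_list: list[str]) -> bool: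
--     """tests if list is in alphabetical order"""
--     # single pass: every adjacent pair must be non-decreasing under casefold
--     for prev, cur in zip(class_list, class_list[1:]):
--         if cur.casefold() < prev.casefold():
--             return False
--     return True
-- ===== Notes on version B (the rewrite author's own statement) =====
-- stated objective: faster
-- what changed: Instead of sorting the list by casefold and comparing it element by element with the original, B makes a single pass checking that each adjacent pair is non-decreasing under casefold, returning False at the first inversion.
import Mathlib
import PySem

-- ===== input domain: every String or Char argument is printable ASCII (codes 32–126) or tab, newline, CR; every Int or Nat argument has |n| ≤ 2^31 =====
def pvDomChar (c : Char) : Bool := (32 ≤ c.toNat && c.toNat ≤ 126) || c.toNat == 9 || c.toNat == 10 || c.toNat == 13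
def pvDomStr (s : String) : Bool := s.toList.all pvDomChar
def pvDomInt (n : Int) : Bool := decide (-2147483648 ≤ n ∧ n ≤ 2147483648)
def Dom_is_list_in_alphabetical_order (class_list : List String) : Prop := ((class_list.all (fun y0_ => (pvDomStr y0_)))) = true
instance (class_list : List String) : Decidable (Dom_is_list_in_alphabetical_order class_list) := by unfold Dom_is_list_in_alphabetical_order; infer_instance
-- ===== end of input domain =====

-- B: one pass over adjacent pairs (non-decreasing under casefold) instead of sorting and
-- comparing with the sorted copy; equal return value on every input in the domain.
-- On the printable-ASCII domain str.casefold coincides with str.lower, ported as PySem.Str.lower.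

-- ===== PORT A =====
-- the 'for i in range(len(class_list))' loop with its break: goes through the index list,
-- returns False at the first mismatch (indices are always in range, so getD's default is never used)
def pvALoop (sorted_class_names class_list : List String) : List Nat → Bool
  | [] => true
  | i :: rest =>
    if sorted_class_names.getD i "" != class_list.getD i "" then false
    else pvALoop sorted_class_names class_list rest

def is_list_in_alphabetical_order (class_list : List String) : Bool :=
  let sorted_class_names := PySem.List.sorted class_list (fun s => PySem.Str.lower s) false
  pvALoop sorted_class_names class_list (List.range class_list.length)

-- ===== PORT B =====
-- the 'for prev, cur in zip(class_list, class_list[1:])' loop with its early return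
def pvBLoop : List String → Bool
  | [] => true
  | [_] => true
  | prev :: cur :: rest =>
    if PySem.Str.lower cur < PySem.Str.lower prev then false
    else pvBLoop (cur :: rest)

def is_list_in_alphabetical_order_alt (class_list : List String) : Bool :=
  pvBLoop class_list

-- ===== PRECONDITION & SPEC =====

def Spec_is_list_in_alphabetical_order (class_list : List String) (out : Bool) : Prop := out = is_list_in_alphabetical_order_alt class_list
instance (class_list : List String) (out : Bool) : Decidable (Spec_is_list_in_alphabetical_order class_list out) := by unfold Spec_is_list_in_alphabetical_order; infer_instance

-- ===== CLAIM (what is proved, stated in full; the proofs are below) =====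
def Claim_equal_is_list_in_alphabetical_order : Prop := ∀ (class_list : List String), Dom_is_list_in_alphabetical_order class_list → Spec_is_list_in_alphabetical_order class_list (is_list_in_alphabetical_order class_list)

-- ===== LEMMAS AND PROOFS =====


-- A's loop over the index list is an 'all' over that list
theorem pvALoop_eq_all (s xs : List String) (idxs : List Nat) :
    pvALoop s xs idxs = idxs.all (fun i => s.getD i "" == xs.getD i "") := by
  induction idxs with
  | nil => rfl
  | cons i rest ih =>
    simp [pvALoop, ih, Bool.beq_eq_decide_eq]

-- elementwise getD-equality on all indices of equal-length lists is list equality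
theorem getD_all_eq_iff (s xs : List String) (h : s.length = xs.length) :
    (∀ i ∈ List.range xs.length, s.getD i "" = xs.getD i "") ↔ s = xs := by
  constructor
  · intro hall
    apply List.ext_getElem h
    intro i h1 h2
    have := hall i (List.mem_range.mpr h2)
    rwa [List.getD_eq_getElem s _ h1, List.getD_eq_getElem xs _ h2] at this
  · intro he i _
    rw [he]

-- B's loop checks exactly the chain of adjacent non-decreasing (under lower) pairs
theorem pvBLoop_iff (xs : List String) :
    pvBLoop xs = true ↔ xs.IsChain (fun a b => PySem.Str.lower a ≤ PySem.Str.lower b) := by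
  induction xs with
  | nil => exact iff_of_true rfl List.IsChain.nil
  | cons a t ih =>
    cases t with
    | nil => exact iff_of_true rfl (List.IsChain.singleton a)
    | cons b t' =>
      by_cases h : PySem.Str.lower b < PySem.Str.lower a
      · rw [List.isChain_cons_cons]
        simp only [pvBLoop, if_pos h]
        exact iff_of_false (by simp) (fun hc => absurd hc.1 (not_le.mpr h))
      · rw [List.isChain_cons_cons]
        simp only [pvBLoop, if_neg h, ih]
        rw [not_lt] at h
        exact (and_iff_right h).symm

-- xs equals its stable sort by a key iff it is already pairwise key-nondecreasing
theorem sorted_eq_self_iff_pairwise (xs : List String) :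
    PySem.List.sorted xs (fun s => PySem.Str.lower s) false = xs ↔
      xs.Pairwise (fun a b => PySem.Str.lower a ≤ PySem.Str.lower b) := by
  constructor
  · intro h
    rw [← h]
    exact PySem.List.sorted_pairwise xs (fun s => PySem.Str.lower s)
  · exact PySem.List.sorted_eq_self_of_pairwise xs _

-- ===== VERDICT (by name: the statement is the Claim_ definition above) =====
theorem is_list_in_alphabetical_order_spec : Claim_equal_is_list_in_alphabetical_order := by
  intro class_list _
  unfold Spec_is_list_in_alphabetical_order
  rw [Bool.eq_iff_iff]
  unfold is_list_in_alphabetical_order is_list_in_alphabetical_order_alt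
  have hlen : (PySem.List.sorted class_list (fun s => PySem.Str.lower s) false).length
      = class_list.length := PySem.List.length_sorted ..
  rw [pvALoop_eq_all, List.all_eq_true]
  simp only [beq_iff_eq]
  rw [getD_all_eq_iff _ _ hlen, sorted_eq_self_iff_pairwise, pvBLoop_iff]
  haveI : IsTrans String (fun a b => PySem.Str.lower a ≤ PySem.Str.lower b) :=
    ⟨fun _ _ _ => le_trans⟩
  exact List.isChain_iff_pairwise.symm
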